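-- pv_equiv track=rewrite | github.com/AmosElitzur1/hebrew_calendar | imports/calendar_functions.py | years_since_0
-- ===== SOURCE A (Python) =====
-- def type_year (year): #type of the year: pshuta or meuberet
--   return "Meuberet" if (year % 19) in (0,3,6,8,11,14,17) else "Pshuta"
--
-- def years_since_0 (year) -> tuple[int,int,int]: #how many years since year 0 to this year.
--   mahzorim = year//19
--   meubarot = 0
--   pshutot = 0
--   y = year % 19
--   for i in range (1,y+1):
--     if type_year(i) == "Pshuta":
--       pshutot += 1
--     else:
--       meubarot += 1
--   return mahzorim, pshutot, meubarot
-- ===== SOURCE B (Python) =====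
-- LEAP_POSITIONS = (3, 6, 8, 11, 14, 17)
--
-- def years_since_0(year) -> tuple[int, int, int]:
--     mahzorim = year // 19
--     y = year % 19
--     meubarot = sum(1 for p in LEAP_POSITIONS if p <= y)
--     return mahzorim, y - meubarot, meubarot
-- ===== Notes on version B (the rewrite author's own statement) =====
-- stated objective: simpler
-- what changed: Instead of looping over every year 1..y and classifying each via type_year, B counts how many of the six fixed leap positions (3,6,8,11,14,17) are <= y and gets the common-year count by subtraction.
import Mathlib
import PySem

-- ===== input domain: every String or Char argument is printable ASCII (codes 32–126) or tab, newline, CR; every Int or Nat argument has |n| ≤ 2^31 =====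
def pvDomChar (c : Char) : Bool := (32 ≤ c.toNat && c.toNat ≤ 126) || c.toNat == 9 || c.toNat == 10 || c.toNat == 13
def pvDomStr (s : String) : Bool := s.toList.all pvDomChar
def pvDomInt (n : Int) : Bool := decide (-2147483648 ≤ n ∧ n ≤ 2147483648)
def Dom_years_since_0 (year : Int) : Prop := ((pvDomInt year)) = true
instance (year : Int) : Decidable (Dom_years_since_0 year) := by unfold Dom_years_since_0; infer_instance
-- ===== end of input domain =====

-- B replaces the per-year classification loop by counting the six fixed leap positions ≤ y (simpler decomposition).

-- ===== PORT A =====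
def type_year (year : Int) : String :=
  if PySem.Int.mod year 19 ∈ ([0, 3, 6, 8, 11, 14, 17] : List Int) then "Meuberet" else "Pshuta"

def years_since_0 (year : Int) : Int × Int × Int :=
  let mahzorim := PySem.Int.floordiv year 19
  let y := PySem.Int.mod year 19
  let st := (PySem.List.pyRange 1 (y + 1) 1).foldl
    (fun (s : Int × Int) i =>
      if type_year i = "Pshuta" then (s.1 + 1, s.2) else (s.1, s.2 + 1))
    (0, 0)
  (mahzorim, st.1, st.2)

-- ===== PORT B =====
def years_since_0_alt (year : Int) : Int × Int × Int :=
  let mahzorim := PySem.Int.floordiv year 19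
  let y := PySem.Int.mod year 19
  let meubarot : Int := (([3, 6, 8, 11, 14, 17] : List Int).filter (fun p => p ≤ y)).length
  (mahzorim, y - meubarot, meubarot)

-- ===== PRECONDITION & SPEC =====
def Spec_years_since_0 (year : Int) (out : Int × Int × Int) : Prop := out = years_since_0_alt year
instance (year : Int) (out : Int × Int × Int) : Decidable (Spec_years_since_0 year out) := by unfold Spec_years_since_0; infer_instance

-- ===== CLAIM (what is proved, stated in full; the proofs are below) =====
def Claim_equal_years_since_0 : Prop := ∀ (year : Int), Dom_years_since_0 year → Spec_years_since_0 year (years_since_0 year)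

-- ===== LEMMAS AND PROOFS =====
-- Both ports depend on `year` only through floordiv and mod; for the residue y ∈ [0,19) the two
-- tail computations agree, checked case by case.
theorem years_since_0_key (y : Int) (h0 : 0 ≤ y) (h1 : y < 19) :
    ((PySem.List.pyRange 1 (y + 1) 1).foldl
      (fun (s : Int × Int) i =>
        if type_year i = "Pshuta" then (s.1 + 1, s.2) else (s.1, s.2 + 1))
      (0, 0))
    = (y - (([3, 6, 8, 11, 14, 17] : List Int).filter (fun p => p ≤ y)).length,
       ((([3, 6, 8, 11, 14, 17] : List Int).filter (fun p => p ≤ y)).length : Int)) := by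
  interval_cases y <;> decide

-- ===== VERDICT (by name: the statement is the Claim_ definition above) =====
theorem years_since_0_spec : Claim_equal_years_since_0 := by
  intro year _
  unfold Spec_years_since_0 years_since_0 years_since_0_alt
  have h0 : 0 ≤ PySem.Int.mod year 19 := by
    rw [PySem.Int.mod_eq_emod_of_pos (by norm_num)]
    exact Int.emod_nonneg year (by norm_num)
  have h1 : PySem.Int.mod year 19 < 19 := by
    rw [PySem.Int.mod_eq_emod_of_pos (by norm_num)]
    exact Int.emod_lt_of_pos year (by norm_num)
  have hk := years_since_0_key (PySem.Int.mod year 19) h0 h1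
  simp only [hk]
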